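-- pv_equiv track=rewrite | github.com/MrBrantCode/unitest_baseline | mut_generate/mist_train_taco/taco_17623/solution.py | max_beautiful_string_length
-- ===== SOURCE A (Python) =====
-- def max_beautiful_string_length(s: str) -> int:
--     n = len(s)
--     ca = [0] * (n + 1)
--     cb = [0] * (n + 1)
--
--     # Count cumulative 'a's and 'b's
--     for i in range(n):
--         if s[i] == 'a':
--             ca[i + 1] += 1
--         else:
--             cb[i + 1] += 1
--
--     # Calculate prefix sums
--     for i in range(n):
--         ca[i + 1] += ca[i]
--         cb[i + 1] += cb[i]
--
--     ans = min(ca[-1], cb[-1])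
--
--     # Calculate the minimum deletions required to make the string beautiful
--     for l in range(1, n + 1):
--         ans = min(ans, ca[l] + (cb[-1] - cb[l]))
--         ans = min(ans, cb[l] + (ca[-1] - ca[l]))
--         for r in range(l, n + 1):
--             ans = min(ans, cb[l] + (ca[r] - ca[l]) + (cb[-1] - cb[r]))
--
--     # The maximum length of the beautiful string is the total length minus the minimum deletions
--     return n - ans
-- ===== SOURCE B (Python) =====
-- def max_beautiful_string_length(s: str) -> int:
--     # One pass: min deletions = cb_total + min over r of (prefix-min of cb-ca) + (ca-cb at r)
--     ca = cb = m = best = 0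
--     for ch in s:
--         if ch == 'a':
--             ca += 1
--         else:
--             cb += 1
--         m = min(m, cb - ca)
--         best = min(best, m + ca - cb)
--     return len(s) - (best + cb)
-- ===== Notes on version B (the rewrite author's own statement) =====
-- stated objective: faster
-- what changed: Replaced the prefix-count arrays and the nested l,r minimisation (quadratic) by a single left-to-right scan that keeps the running prefix minimum of cb-ca and folds the best split value on the fly.
import Mathlib
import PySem

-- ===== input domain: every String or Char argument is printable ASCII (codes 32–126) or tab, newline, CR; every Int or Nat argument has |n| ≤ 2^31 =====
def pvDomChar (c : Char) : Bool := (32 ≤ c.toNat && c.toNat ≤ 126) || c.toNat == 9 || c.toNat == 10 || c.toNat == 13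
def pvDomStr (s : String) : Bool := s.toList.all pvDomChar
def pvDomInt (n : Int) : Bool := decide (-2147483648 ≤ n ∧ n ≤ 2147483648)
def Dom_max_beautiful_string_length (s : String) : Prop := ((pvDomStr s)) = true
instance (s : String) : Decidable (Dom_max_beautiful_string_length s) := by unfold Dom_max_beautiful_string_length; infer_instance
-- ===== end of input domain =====

-- B replaces A's prefix-count arrays and nested l,r minimisation (quadratic) by one
-- left-to-right scan keeping the running prefix minimum of cb-ca (objective: faster, O(n)).

-- ===== PORT A =====
-- one helper per Python loop body; each is a literal transliteration of its line(s)

-- body of: for i in range(n): if s[i]=='a': ca[i+1]+=1 else: cb[i+1]+=1   (indices always in range)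
def astep1 (s : String) (p : List Int × List Int) (i : Int) : List Int × List Int :=
  if (PySem.Str.pyGet? s i).getD ' ' = 'a' then
    (PySem.List.pySetD p.1 (i + 1) (PySem.List.pyGetD p.1 (i + 1) 0 + 1), p.2)
  else
    (p.1, PySem.List.pySetD p.2 (i + 1) (PySem.List.pyGetD p.2 (i + 1) 0 + 1))

-- body of: for i in range(n): ca[i+1]+=ca[i]; cb[i+1]+=cb[i]
def astep2 (p : List Int × List Int) (i : Int) : List Int × List Int :=
  (PySem.List.pySetD p.1 (i + 1) (PySem.List.pyGetD p.1 (i + 1) 0 + PySem.List.pyGetD p.1 i 0),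
   PySem.List.pySetD p.2 (i + 1) (PySem.List.pyGetD p.2 (i + 1) 0 + PySem.List.pyGetD p.2 i 0))

-- body of the inner loop: ans = min(ans, cb[l]+(ca[r]-ca[l])+(cb[-1]-cb[r]))
def ainner (ca cb : List Int) (l : Int) (ans : Int) (r : Int) : Int :=
  min ans (PySem.List.pyGetD cb l 0 + (PySem.List.pyGetD ca r 0 - PySem.List.pyGetD ca l 0)
    + (PySem.List.pyGetD cb (-1) 0 - PySem.List.pyGetD cb r 0))

-- body of the outer loop over l (two min updates, then the inner loop over r)
def aouter (n : Int) (ca cb : List Int) (ans : Int) (l : Int) : Int :=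
  let ans := min ans (PySem.List.pyGetD ca l 0 + (PySem.List.pyGetD cb (-1) 0 - PySem.List.pyGetD cb l 0))
  let ans := min ans (PySem.List.pyGetD cb l 0 + (PySem.List.pyGetD ca (-1) 0 - PySem.List.pyGetD ca l 0))
  (PySem.List.pyRange l (n + 1) 1).foldl (ainner ca cb l) ans

def max_beautiful_string_length (s : String) : Int :=
  let n := PySem.Str.len s
  let p1 := (PySem.List.pyRange 0 n 1).foldl (astep1 s)
    (List.replicate (n + 1).toNat 0, List.replicate (n + 1).toNat 0)
  let p2 := (PySem.List.pyRange 0 n 1).foldl astep2 p1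
  let ans := min (PySem.List.pyGetD p2.1 (-1) 0) (PySem.List.pyGetD p2.2 (-1) 0)
  let ans := (PySem.List.pyRange 1 (n + 1) 1).foldl (aouter n p2.1 p2.2) ans
  n - ans

-- ===== PORT B =====
-- body of B's single loop
def bstep (q : Int × Int × Int × Int) (ch : Char) : Int × Int × Int × Int :=
  let ca := if ch = 'a' then q.1 + 1 else q.1
  let cb := if ch = 'a' then q.2.1 else q.2.1 + 1
  let m := min q.2.2.1 (cb - ca)
  let best := min q.2.2.2 (m + ca - cb)
  (ca, cb, m, best)

def max_beautiful_string_length_alt (s : String) : Int :=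
  let q := s.toList.foldl bstep (0, 0, 0, 0)
  PySem.Str.len s - (q.2.2.2 + q.2.1)

-- ===== PRECONDITION & SPEC =====
def Spec_max_beautiful_string_length (s : String) (out : Int) : Prop := out = max_beautiful_string_length_alt s
instance (s : String) (out : Int) : Decidable (Spec_max_beautiful_string_length s out) := by unfold Spec_max_beautiful_string_length; infer_instance

-- ===== CLAIM (what is proved, stated in full; the proofs are below) =====
def Claim_equal_max_beautiful_string_length : Prop := ∀ (s : String), Dom_max_beautiful_string_length s → Spec_max_beautiful_string_length s (max_beautiful_string_length s)

-- ===== LEMMAS AND PROOFS =====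

-- prefix counts: number of 'a' / non-'a' among the first k characters
def cntA (t : List Char) (k : Nat) : Int := ((t.take k).countP (· == 'a') : Int)
def cntB (t : List Char) (k : Nat) : Int := ((t.take k).countP (fun c => !(c == 'a')) : Int)
-- per-position increments (value 0 at k = 0)
def indA (t : List Char) (k : Nat) : Int := cntA t k - cntA t (k - 1)
def indB (t : List Char) (k : Nat) : Int := cntB t k - cntB t (k - 1)
-- running prefix minimum of cb-ca, and the best (deletions - cb_total) so far
def gMin (t : List Char) : Nat → Int
  | 0 => 0
  | k + 1 => min (gMin t k) (cntB t (k + 1) - cntA t (k + 1))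
def bestF (t : List Char) : Nat → Int
  | 0 => 0
  | k + 1 => min (bestF t k) (gMin t (k + 1) + (cntA t (k + 1) - cntB t (k + 1)))

lemma cntA_zero (t : List Char) : cntA t 0 = 0 := by simp [cntA]
lemma cntB_zero (t : List Char) : cntB t 0 = 0 := by simp [cntB]

lemma take_succ_eq (t : List Char) (k : Nat) (h : k < t.length) :
    t.take (k + 1) = t.take k ++ [t[k]] := by
  rw [List.take_add_one]
  simp [List.getElem?_eq_getElem h]

lemma cntA_succ (t : List Char) (k : Nat) (h : k < t.length) :
    cntA t (k + 1) = cntA t k + (if t[k] = 'a' then 1 else 0) := by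
  simp only [cntA, take_succ_eq t k h, List.countP_append]
  by_cases h1 : t[k] = 'a' <;> simp [h1]

lemma cntB_succ (t : List Char) (k : Nat) (h : k < t.length) :
    cntB t (k + 1) = cntB t k + (if t[k] = 'a' then 0 else 1) := by
  simp only [cntB, take_succ_eq t k h, List.countP_append]
  by_cases h1 : t[k] = 'a' <;> simp [h1]

lemma indA_zero (t : List Char) : indA t 0 = 0 := by simp [indA]
lemma indB_zero (t : List Char) : indB t 0 = 0 := by simp [indB]
lemma indA_succ (t : List Char) (k : Nat) (h : k < t.length) :
    indA t (k + 1) = if t[k] = 'a' then 1 else 0 := by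
  simp [indA, cntA_succ t k h]
lemma indB_succ (t : List Char) (k : Nat) (h : k < t.length) :
    indB t (k + 1) = if t[k] = 'a' then 0 else 1 := by
  simp [indB, cntB_succ t k h]
lemma cntA_succ_ind (t : List Char) (k : Nat) :
    cntA t (k + 1) = cntA t k + indA t (k + 1) := by simp [indA]
lemma cntB_succ_ind (t : List Char) (k : Nat) :
    cntB t (k + 1) = cntB t k + indB t (k + 1) := by simp [indB]

-- generic facts about min-like foldl's
lemma foldl_le_init {α : Type} (F : Int → α → Int) :
    ∀ (L : List α) (a : Int), (∀ b x, x ∈ L → F b x ≤ b) → L.foldl F a ≤ a := by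
  intro L
  induction L with
  | nil => simp
  | cons x L ih =>
    intro a hF
    simp only [List.foldl_cons]
    exact le_trans (ih _ (fun b y hy => hF b y (List.mem_cons_of_mem _ hy)))
      (hF a x (List.mem_cons_self))

lemma foldl_le_of_mem {α : Type} (F : Int → α → Int) {c : Int} :
    ∀ (L : List α) (a : Int), (∀ b y, y ∈ L → F b y ≤ b) →
      ∀ x ∈ L, (∀ b, F b x ≤ c) → L.foldl F a ≤ c := by
  intro L
  induction L with
  | nil => simp
  | cons y L ih =>
    intro a hF x hx hc
    simp only [List.foldl_cons]
    rcases List.mem_cons.mp hx with h | h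
    · subst h
      exact le_trans (foldl_le_init F L _ (fun b z hz => hF b z (List.mem_cons_of_mem _ hz))) (hc a)
    · exact ih _ (fun b z hz => hF b z (List.mem_cons_of_mem _ hz)) x h hc

lemma le_foldl {α : Type} (F : Int → α → Int) {c : Int} :
    ∀ (L : List α) (a : Int), (∀ b x, x ∈ L → c ≤ b → c ≤ F b x) → c ≤ a → c ≤ L.foldl F a := by
  intro L
  induction L with
  | nil => simpa using fun _ _ h => h
  | cons x L ih =>
    intro a hF ha
    simp only [List.foldl_cons]
    exact ih _ (fun b y hy hb => hF b y (List.mem_cons_of_mem _ hy) hb)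
      (hF a x (List.mem_cons_self) ha)

-- bounds and attainment for gMin / bestF
lemma gMin_le (t : List Char) {l k : Nat} (h : l ≤ k) :
    gMin t k ≤ cntB t l - cntA t l := by
  induction k with
  | zero =>
    interval_cases l
    simp [gMin, cntA_zero, cntB_zero]
  | succ k ih =>
    rcases Nat.lt_or_ge l (k + 1) with h1 | h1
    · exact le_trans (min_le_left _ _) (ih (by omega))
    · have : l = k + 1 := by omega
      subst this
      exact min_le_right _ _

lemma gMin_nonpos (t : List Char) (k : Nat) : gMin t k ≤ 0 := by
  have := gMin_le t (Nat.zero_le k)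
  simpa [cntA_zero, cntB_zero] using this

lemma bestF_le (t : List Char) {r k : Nat} (h : r ≤ k) :
    bestF t k ≤ gMin t r + (cntA t r - cntB t r) := by
  induction k with
  | zero =>
    interval_cases r
    simp [bestF, gMin, cntA_zero, cntB_zero]
  | succ k ih =>
    rcases Nat.lt_or_ge r (k + 1) with h1 | h1
    · exact le_trans (min_le_left _ _) (ih (by omega))
    · have : r = k + 1 := by omega
      subst this
      exact min_le_right _ _

lemma bestF_nonpos (t : List Char) (k : Nat) : bestF t k ≤ 0 := by
  have := bestF_le t (Nat.zero_le k)
  simpa [gMin, cntA_zero, cntB_zero] using this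

lemma gMin_attain (t : List Char) (k : Nat) :
    ∃ l ≤ k, gMin t k = cntB t l - cntA t l := by
  induction k with
  | zero => exact ⟨0, le_refl _, by simp [gMin, cntA_zero, cntB_zero]⟩
  | succ k ih =>
    rcases ih with ⟨l, hl, he⟩
    rcases min_cases (gMin t k) (cntB t (k + 1) - cntA t (k + 1)) with ⟨h1, _⟩ | ⟨h1, _⟩
    · exact ⟨l, by omega, by simp only [gMin]; rw [h1]; exact he⟩
    · exact ⟨k + 1, le_refl _, by simp only [gMin]; rw [h1]⟩

lemma bestF_attain (t : List Char) (k : Nat) :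
    ∃ r ≤ k, bestF t k = gMin t r + (cntA t r - cntB t r) := by
  induction k with
  | zero => exact ⟨0, le_refl _, by simp [bestF, gMin, cntA_zero, cntB_zero]⟩
  | succ k ih =>
    rcases ih with ⟨r, hr, he⟩
    rcases min_cases (bestF t k) (gMin t (k + 1) + (cntA t (k + 1) - cntB t (k + 1))) with ⟨h1, _⟩ | ⟨h1, _⟩
    · exact ⟨r, by omega, by simp only [bestF]; rw [h1]; exact he⟩
    · exact ⟨k + 1, le_refl _, by simp only [bestF]; rw [h1]⟩

-- ===== B-side characterisation =====
lemma bstep_spec (t p u : List Char) (c : Char) (h : t = p ++ c :: u) :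
    bstep (cntA t p.length, cntB t p.length, gMin t p.length, bestF t p.length) c
      = (cntA t (p.length + 1), cntB t (p.length + 1), gMin t (p.length + 1), bestF t (p.length + 1)) := by
  have hlen : p.length < t.length := by subst h; simp
  have hget : t[p.length]'hlen = c := by
    subst h
    simp [List.getElem_append_right]
  have hA := cntA_succ t p.length hlen
  have hB := cntB_succ t p.length hlen
  rw [hget] at hA hB
  by_cases hc : c = 'a' <;>
    simp [bstep, hc, hA, hB, gMin, bestF] <;> ring_nf

lemma bloop (t : List Char) : ∀ (u p : List Char), t = p ++ u →
    u.foldl bstep (cntA t p.length, cntB t p.length, gMin t p.length, bestF t p.length)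
      = (cntA t t.length, cntB t t.length, gMin t t.length, bestF t t.length) := by
  intro u
  induction u with
  | nil => intro p h; subst h; simp
  | cons c u ih =>
    intro p h
    simp only [List.foldl_cons, bstep_spec t p u c h]
    have h2 : t = (p ++ [c]) ++ u := by simp [h]
    have := ih (p ++ [c]) h2
    simpa using this

lemma alt_eq (s : String) :
    max_beautiful_string_length_alt s
      = (s.toList.length : Int) - (bestF s.toList s.toList.length + cntB s.toList s.toList.length) := by
  have h0 := bloop s.toList s.toList [] (by simp)
  simp only [List.length_nil, cntA_zero, cntB_zero] at h0
  simp only [max_beautiful_string_length_alt, PySem.Str.len_eq]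
  rw [show (gMin s.toList 0) = 0 from rfl, show (bestF s.toList 0) = 0 from rfl] at h0
  rw [h0]

-- ===== A-side: array characterisation =====
lemma replicate_eq_map (t : List Char) (f : Nat → Int) (hf : ∀ k, k ≤ 0 → f k = 0) :
    List.replicate (t.length + 1) (0 : Int) = (List.range (t.length + 1)).map (fun k => if k ≤ 0 then f k else 0) := by
  apply List.ext_getElem (by simp)
  intro i h1 h2
  simp only [List.getElem_replicate, List.getElem_map, List.getElem_range]
  split_ifs with h
  · exact (hf i h).symm
  · rfl

lemma set_map_range (m : Nat) (f : Nat → Int) (j : Nat) (v : Int) (hj : j < m) :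
    ((List.range m).map f).set j v = (List.range m).map (fun k => if k = j then v else f k) := by
  apply List.ext_getElem (by simp)
  intro i h1 h2
  simp only [List.getElem_set, List.getElem_map, List.getElem_range]
  split_ifs with h h' h'
  · rfl
  · omega
  · omega
  · rfl

lemma stage1 (s : String) : ∀ j : Nat, j ≤ s.toList.length →
    (PySem.List.pyRange 0 (j : Int) 1).foldl (astep1 s)
        (List.replicate (s.toList.length + 1) (0 : Int), List.replicate (s.toList.length + 1) (0 : Int))
      = ((List.range (s.toList.length + 1)).map (fun k => if k ≤ j then indA s.toList k else 0),
         (List.range (s.toList.length + 1)).map (fun k => if k ≤ j then indB s.toList k else 0)) := by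
  intro j
  induction j with
  | zero =>
    intro _
    rw [PySem.List.pyRange_one_eq_nil (by norm_num)]
    simp only [List.foldl_nil]
    exact congrArg₂ Prod.mk
      (replicate_eq_map s.toList (indA s.toList) (fun k hk => by interval_cases k; exact indA_zero _))
      (replicate_eq_map s.toList (indB s.toList) (fun k hk => by interval_cases k; exact indB_zero _))
  | succ j ih =>
    intro hj
    have hj' : j < s.toList.length := by omega
    have hsplit : PySem.List.pyRange 0 ((j : Int) + 1) 1 = PySem.List.pyRange 0 (j : Int) 1 ++ [(j : Int)] :=
      PySem.List.pyRange_one_succ_right (by positivity)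
    rw [show ((j + 1 : Nat) : Int) = (j : Int) + 1 by push_cast; ring, hsplit, List.foldl_append,
      ih (by omega)]
    have hget : PySem.Str.pyGet? s (j : Int) = some (s.toList[j]'hj') := by
      rw [PySem.Str.pyGet?_natCast]
      simp
    by_cases hc : s.toList[j]'hj' = 'a'
    · simp only [List.foldl_cons, List.foldl_nil, astep1, hget, Option.getD_some, hc, if_true]
      rw [show ((j : Int) + 1) = ((j + 1 : Nat) : Int) by push_cast; ring,
        PySem.List.pySetD_natCast, PySem.List.pyGetD_natCast,
        PySem.List.getD_map_range _ _ _ _ (by omega)]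
      rw [if_neg (by omega), set_map_range _ _ _ _ (by omega)]
      refine congrArg₂ Prod.mk ?_ ?_
      · apply List.map_congr_left
        intro k hk
        by_cases hkj : k = j + 1
        · subst hkj
          rw [if_pos rfl, if_pos (le_refl _), indA_succ s.toList j hj', if_pos hc]
          norm_num
        · simp only [if_neg hkj]
          split_ifs with h1 h2 h2 <;> first | rfl | omega
      · apply List.map_congr_left
        intro k hk
        by_cases hkj : k = j + 1
        · subst hkj
          rw [if_neg (by omega), if_pos (le_refl _), indB_succ s.toList j hj', if_pos hc]
        · split_ifs with h1 h2 h2 <;> first | rfl | omega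
    · simp only [List.foldl_cons, List.foldl_nil, astep1, hget, Option.getD_some, hc, if_false]
      rw [show ((j : Int) + 1) = ((j + 1 : Nat) : Int) by push_cast; ring,
        PySem.List.pySetD_natCast, PySem.List.pyGetD_natCast,
        PySem.List.getD_map_range _ _ _ _ (by omega)]
      rw [if_neg (by omega), set_map_range _ _ _ _ (by omega)]
      refine congrArg₂ Prod.mk ?_ ?_
      · apply List.map_congr_left
        intro k hk
        by_cases hkj : k = j + 1
        · subst hkj
          rw [if_neg (by omega), if_pos (le_refl _), indA_succ s.toList j hj', if_neg hc]
        · split_ifs with h1 h2 h2 <;> first | rfl | omega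
      · apply List.map_congr_left
        intro k hk
        by_cases hkj : k = j + 1
        · subst hkj
          rw [if_pos rfl, if_pos (le_refl _), indB_succ s.toList j hj', if_neg hc]
          norm_num
        · simp only [if_neg hkj]
          split_ifs with h1 h2 h2 <;> first | rfl | omega

lemma stage2 (s : String) : ∀ j : Nat, j ≤ s.toList.length →
    (PySem.List.pyRange 0 (j : Int) 1).foldl astep2
        ((List.range (s.toList.length + 1)).map (indA s.toList),
         (List.range (s.toList.length + 1)).map (indB s.toList))
      = ((List.range (s.toList.length + 1)).map (fun k => if k ≤ j then cntA s.toList k else indA s.toList k),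
         (List.range (s.toList.length + 1)).map (fun k => if k ≤ j then cntB s.toList k else indB s.toList k)) := by
  intro j
  induction j with
  | zero =>
    intro _
    rw [PySem.List.pyRange_one_eq_nil (by norm_num)]
    simp only [List.foldl_nil]
    refine congrArg₂ Prod.mk ?_ ?_
    · apply List.map_congr_left
      intro k hk
      split_ifs with h
      · interval_cases k
        rw [cntA_zero, indA_zero]
      · rfl
    · apply List.map_congr_left
      intro k hk
      split_ifs with h
      · interval_cases k
        rw [cntB_zero, indB_zero]
      · rfl
  | succ j ih =>
    intro _
    have hsplit : PySem.List.pyRange 0 ((j : Int) + 1) 1 = PySem.List.pyRange 0 (j : Int) 1 ++ [(j : Int)] :=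
      PySem.List.pyRange_one_succ_right (by positivity)
    rw [show ((j + 1 : Nat) : Int) = (j : Int) + 1 by push_cast; ring, hsplit, List.foldl_append,
      ih (by omega)]
    simp only [List.foldl_cons, List.foldl_nil, astep2]
    rw [show ((j : Int) + 1) = ((j + 1 : Nat) : Int) by push_cast; ring]
    simp only [PySem.List.pySetD_natCast, PySem.List.pyGetD_natCast]
    rw [PySem.List.getD_map_range _ _ _ _ (by omega), PySem.List.getD_map_range _ _ _ _ (by omega),
      PySem.List.getD_map_range _ _ _ _ (by omega), PySem.List.getD_map_range _ _ _ _ (by omega)]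
    have eA1 : (if j + 1 ≤ j then cntA s.toList (j + 1) else indA s.toList (j + 1)) = indA s.toList (j + 1) := if_neg (by omega)
    have eA2 : (if j ≤ j then cntA s.toList j else indA s.toList j) = cntA s.toList j := if_pos (le_refl j)
    have eB1 : (if j + 1 ≤ j then cntB s.toList (j + 1) else indB s.toList (j + 1)) = indB s.toList (j + 1) := if_neg (by omega)
    have eB2 : (if j ≤ j then cntB s.toList j else indB s.toList j) = cntB s.toList j := if_pos (le_refl j)
    rw [eA1, eA2, eB1, eB2, set_map_range _ _ _ _ (by omega), set_map_range _ _ _ _ (by omega)]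
    refine congrArg₂ Prod.mk ?_ ?_
    · apply List.map_congr_left
      intro k hk
      by_cases hkj : k = j + 1
      · subst hkj
        rw [if_pos rfl, if_pos (le_refl _), cntA_succ_ind]
        ring
      · simp only [if_neg hkj]
        split_ifs with h1 h2 h2 <;> first | rfl | omega
    · apply List.map_congr_left
      intro k hk
      by_cases hkj : k = j + 1
      · subst hkj
        rw [if_pos rfl, if_pos (le_refl _), cntB_succ_ind]
        ring
      · simp only [if_neg hkj]
        split_ifs with h1 h2 h2 <;> first | rfl | omega

-- getters on the characterised arrays
lemma getD_map_range_int (f : Nat → Int) (m : Nat) (i : Int) (h0 : 0 ≤ i) (h1 : i < (m : Int)) :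
    PySem.List.pyGetD ((List.range m).map f) i 0 = f i.toNat := by
  rw [PySem.List.pyGetD_eq_getElem _ _ h0 (by simpa using h1)]
  simp only [List.getElem_map, List.getElem_range]

lemma getD_map_range_last (f : Nat → Int) (m : Nat) :
    PySem.List.pyGetD ((List.range (m + 1)).map f) (-1) 0 = f m := by
  rw [PySem.List.pyGetD_neg_ofNat _ 1 0 (by norm_num) (by simp)]
  simp only [List.length_map, List.length_range, List.getElem_map, List.getElem_range]
  norm_num

-- ===== the key fold identity: A's minimisation = cntB + bestF =====
lemma ans_eq (t : List Char) :
    (PySem.List.pyRange 1 ((t.length : Int) + 1) 1).foldl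
        (aouter (t.length : Int) ((List.range (t.length + 1)).map (cntA t)) ((List.range (t.length + 1)).map (cntB t)))
        (min (cntA t t.length) (cntB t t.length))
      = cntB t t.length + bestF t t.length := by
  set L := t.length with hL
  set ca := (List.range (L + 1)).map (cntA t) with hca
  set cb := (List.range (L + 1)).map (cntB t) with hcb
  have hgetA : ∀ (i : Int), 0 ≤ i → i ≤ (L : Int) → PySem.List.pyGetD ca i 0 = cntA t i.toNat := by
    intro i h0 h1; rw [hca]; exact getD_map_range_int _ _ _ h0 (by push_cast; omega)
  have hgetB : ∀ (i : Int), 0 ≤ i → i ≤ (L : Int) → PySem.List.pyGetD cb i 0 = cntB t i.toNat := by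
    intro i h0 h1; rw [hcb]; exact getD_map_range_int _ _ _ h0 (by push_cast; omega)
  have hlastA : PySem.List.pyGetD ca (-1) 0 = cntA t L := getD_map_range_last _ _
  have hlastB : PySem.List.pyGetD cb (-1) 0 = cntB t L := getD_map_range_last _ _
  -- every aouter step shrinks the accumulator
  have hshrink : ∀ (b : Int) (l : Int), aouter (L : Int) ca cb b l ≤ b := by
    intro b l
    unfold aouter
    refine le_trans (foldl_le_init _ _ _ (fun b' r _ => min_le_left _ _)) ?_
    exact le_trans (min_le_left _ _) (min_le_left _ _)
  apply le_antisymm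
  · -- ans ≤ cntB L + bestF L: exhibit the optimal pair (l*, r*)
    rcases bestF_attain t L with ⟨r, hr, her⟩
    rcases gMin_attain t r with ⟨l, hl, hel⟩
    by_cases hl0 : l = 0
    · subst hl0
      rw [cntA_zero, cntB_zero] at hel
      by_cases hr0 : r = 0
      · -- c = cntB L; the initial min(ca[-1], cb[-1]) already reaches it
        subst hr0
        rw [cntA_zero, cntB_zero] at her
        refine le_trans (foldl_le_init _ _ _ (fun b x _ => hshrink b x)) ?_
        rw [her, hel]
        simpa using min_le_right (cntA t L) (cntB t L)
      · -- c = t1 at outer index r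
        apply foldl_le_of_mem _ _ _ (fun b y _ => hshrink b y) ((r : Nat) : Int)
          (PySem.List.mem_pyRange_one.mpr (by push_cast; omega))
        intro b
        unfold aouter
        refine le_trans (foldl_le_init _ _ _ (fun b' r' _ => min_le_left _ _)) ?_
        refine le_trans (min_le_left _ _) (le_trans (min_le_right _ _) ?_)
        rw [hgetA _ (by positivity) (by push_cast; omega), hlastB,
          hgetB _ (by positivity) (by push_cast; omega), Int.toNat_natCast]
        rw [her, hel]
        omega
    · -- l ≥ 1 : c is an inner-loop term at (l, r)
      apply foldl_le_of_mem _ _ _ (fun b y _ => hshrink b y) ((l : Nat) : Int)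
        (PySem.List.mem_pyRange_one.mpr (by push_cast; omega))
      intro b
      unfold aouter
      apply foldl_le_of_mem _ _ _ (fun b' r' _ => min_le_left _ _) ((r : Nat) : Int)
        (PySem.List.mem_pyRange_one.mpr (by push_cast; omega))
      intro b'
      refine le_trans (min_le_right _ _) (le_of_eq ?_)
      rw [hgetB ((l : Nat) : Int) (by positivity) (by push_cast; omega),
        hgetA ((r : Nat) : Int) (by positivity) (by push_cast; omega),
        hgetA ((l : Nat) : Int) (by positivity) (by push_cast; omega),
        hlastB, hgetB ((r : Nat) : Int) (by positivity) (by push_cast; omega),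
        Int.toNat_natCast, Int.toNat_natCast]
      rw [her, hel]
      ring
  · -- cntB L + bestF L ≤ ans : it bounds the init and every generated term
    have hinit : cntB t L + bestF t L ≤ min (cntA t L) (cntB t L) := by
      have h1 := bestF_le t (le_refl L)
      have h2 := gMin_nonpos t L
      have h3 := bestF_nonpos t L
      simp only [le_min_iff]
      omega
    apply le_foldl _ _ _ _ hinit
    intro b l hlmem hb
    have hlb := PySem.List.mem_pyRange_one.mp hlmem
    have hl1 : 1 ≤ l := hlb.1
    have hl2 : l ≤ (L : Int) := by omega
    set lN := l.toNat with hlN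
    have hlcast : l = ((lN : Nat) : Int) := by omega
    have hlNL : lN ≤ L := by omega
    unfold aouter
    apply le_foldl
    · intro b' r hrmem hb'
      have hrb := PySem.List.mem_pyRange_one.mp hrmem
      set rN := r.toNat with hrN
      have hrcast : r = ((rN : Nat) : Int) := by omega
      have hlr : lN ≤ rN := by omega
      have hrL : rN ≤ L := by omega
      unfold ainner
      simp only [le_min_iff]
      refine ⟨hb', ?_⟩
      rw [hlcast, hrcast, hgetB _ (by positivity) (by push_cast; omega),
        hgetA _ (by positivity) (by push_cast; omega),
        hgetA _ (by positivity) (by push_cast; omega), hlastB,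
        hgetB _ (by positivity) (by push_cast; omega),
        Int.toNat_natCast, Int.toNat_natCast]
      have h1 := bestF_le t hrL
      have h2 := gMin_le t hlr
      omega
    · -- the two pre-inner min updates keep the bound
      rw [hlcast, hgetA _ (by positivity) (by push_cast; omega), hlastB,
        hgetB _ (by positivity) (by push_cast; omega), hlastA,
        Int.toNat_natCast]
      simp only [le_min_iff]
      have h1 := bestF_le t hlNL
      have h2 := gMin_nonpos t lN
      have h3 := bestF_le t (le_refl L)
      have h4 := gMin_le t hlNL
      refine ⟨⟨hb, by omega⟩, by omega⟩

lemma a_eq (s : String) :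
    max_beautiful_string_length s
      = (s.toList.length : Int) - (cntB s.toList s.toList.length + bestF s.toList s.toList.length) := by
  simp only [max_beautiful_string_length, PySem.Str.len_eq]
  rw [show ((s.toList.length : Int) + 1).toNat = s.toList.length + 1 by omega]
  rw [stage1 s s.toList.length (le_refl _)]
  have h1 : ((List.range (s.toList.length + 1)).map (fun k => if k ≤ s.toList.length then indA s.toList k else 0))
      = (List.range (s.toList.length + 1)).map (indA s.toList) := by
    apply List.map_congr_left
    intro k hk
    rw [List.mem_range] at hk
    rw [if_pos (by omega)]
  have h2 : ((List.range (s.toList.length + 1)).map (fun k => if k ≤ s.toList.length then indB s.toList k else 0))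
      = (List.range (s.toList.length + 1)).map (indB s.toList) := by
    apply List.map_congr_left
    intro k hk
    rw [List.mem_range] at hk
    rw [if_pos (by omega)]
  rw [h1, h2, stage2 s s.toList.length (le_refl _)]
  have h3 : ((List.range (s.toList.length + 1)).map (fun k => if k ≤ s.toList.length then cntA s.toList k else indA s.toList k))
      = (List.range (s.toList.length + 1)).map (cntA s.toList) := by
    apply List.map_congr_left
    intro k hk
    rw [List.mem_range] at hk
    rw [if_pos (by omega)]
  have h4 : ((List.range (s.toList.length + 1)).map (fun k => if k ≤ s.toList.length then cntB s.toList k else indB s.toList k))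
      = (List.range (s.toList.length + 1)).map (cntB s.toList) := by
    apply List.map_congr_left
    intro k hk
    rw [List.mem_range] at hk
    rw [if_pos (by omega)]
  rw [h3, h4]
  simp only
  rw [getD_map_range_last, getD_map_range_last, ans_eq s.toList]

-- ===== VERDICT (by name: the statement is the Claim_ definition above) =====
theorem max_beautiful_string_length_spec : Claim_equal_max_beautiful_string_length := by
  intro s _
  unfold Spec_max_beautiful_string_length
  rw [a_eq, alt_eq]
  ring
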